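-- pv_equiv track=rewrite | github.com/Jintao-Huang/leetcode_notebook | template/monotone_deque.py | next_min_k
-- ===== SOURCE A (Python) =====
-- from typing import List
-- from collections import deque
--
-- def next_min_k(nums: List[int], k: int) -> List[int]:
--     ans = [-1] * len(nums)
--     q = deque()  # 递减队列. 存索引. 可存数
--     #
--     for lo in reversed(range(len(nums))):
--         while len(q) > 0 and nums[lo] <= nums[q[-1]]:
--             q.pop()
--         q.append(lo)  # 含hi.
--         if len(q) > 0 and q[0] + 1 - lo > k:
--             q.popleft()
--         if len(q) > 0:  #
--             ans[lo] = nums[q[0]]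
--         #
--     return ans
-- ===== SOURCE B (Python) =====
-- from typing import List
--
-- def next_min_k(nums: List[int], k: int) -> List[int]:
--     n = len(nums)
--     ans = [-1] * n
--     for i in range(n):
--         m = None
--         for j in range(i, min(i + k, n)):
--             if m is None or nums[j] < m:
--                 m = nums[j]
--         if m is not None:
--             ans[i] = m
--     return ans
-- ===== Notes on version B (the rewrite author's own statement) =====
-- stated objective: simpler
-- what changed: Replaces the right-to-left monotonic deque single pass with a direct per-index window scan: for each i, ans[i] is the running minimum of nums[i:min(i+k,n)], left -1 when that window is empty.
import Mathlib
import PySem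

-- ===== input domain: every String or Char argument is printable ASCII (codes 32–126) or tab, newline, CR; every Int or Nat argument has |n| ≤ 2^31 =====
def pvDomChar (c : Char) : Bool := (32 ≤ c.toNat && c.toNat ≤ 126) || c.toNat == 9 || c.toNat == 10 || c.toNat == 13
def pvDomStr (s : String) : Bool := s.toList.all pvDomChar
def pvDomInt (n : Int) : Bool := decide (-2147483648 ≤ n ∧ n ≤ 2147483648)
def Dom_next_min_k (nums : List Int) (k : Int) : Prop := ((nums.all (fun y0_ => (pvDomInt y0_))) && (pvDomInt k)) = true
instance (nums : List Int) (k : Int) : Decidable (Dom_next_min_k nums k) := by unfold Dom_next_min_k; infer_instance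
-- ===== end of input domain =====

-- B replaces A's right-to-left monotonic-deque pass by a direct per-index window scan (simpler; return value only, no mutation observable).

-- ===== PORT A =====
-- the while-loop 'while len(q)>0 and nums[lo] <= nums[q[-1]]: q.pop()'; deque kept as a list, front at the head.
-- indices stored in q are always in range in Python, so the getD default 0 is never used.
def popBackA (nums : List Int) (x : Int) (q : List Nat) : List Nat :=
  match q with
  | [] => []
  | a :: t =>
    if x ≤ nums.getD ((a :: t).getLastD 0) 0 then popBackA nums x ((a :: t).dropLast)
    else a :: t
termination_by q.length
decreasing_by simp

-- one iteration of A's 'for lo in reversed(range(len(nums)))' body; state = (ans, q)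
def stepA (nums : List Int) (k : Int) (st : List Int × List Nat) (lo : Nat) : List Int × List Nat :=
  let q1 := popBackA nums (nums.getD lo 0) st.2
  let q2 := q1 ++ [lo]                      -- q.append(lo)
  let q3 := if 0 < q2.length ∧ ((q2.headD 0 : Int) + 1 - (lo : Int) > k) then q2.tail else q2
  let ans' := if 0 < q3.length then st.1.set lo (nums.getD (q3.headD 0) 0) else st.1
  (ans', q3)

def next_min_k (nums : List Int) (k : Int) : List Int :=
  ((List.range nums.length).reverse.foldl (stepA nums k) (List.replicate nums.length (-1), [])).1

-- ===== PORT B =====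
-- inner loop 'for j in range(i, min(i+k, n))' with running minimum m : Option Int ('None' = not set yet);
-- j comes from a range starting at i ≥ 0, so j.toNat is exact and nums.getD's default is never used.
def next_min_k_alt (nums : List Int) (k : Int) : List Int :=
  (List.range nums.length).foldl (fun (ans : List Int) (i : Nat) =>
    let m := (PySem.List.pyRange (i : Int) (min ((i : Int) + k) (nums.length : Int)) 1).foldl
      (fun m j =>
        match m with
        | none => some (nums.getD j.toNat 0)
        | some v => if nums.getD j.toNat 0 < v then some (nums.getD j.toNat 0) else m) none
    match m with
    | some v => ans.set i v
    | none => ans) (List.replicate nums.length (-1))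

-- ===== PRECONDITION & SPEC =====
def Spec_next_min_k (nums : List Int) (k : Int) (out : List Int) : Prop := out = next_min_k_alt nums k
instance (nums : List Int) (k : Int) (out : List Int) : Decidable (Spec_next_min_k nums k out) := by unfold Spec_next_min_k; infer_instance

-- ===== CLAIM (what is proved, stated in full; the proofs are below) =====
def Claim_equal_next_min_k : Prop := ∀ (nums : List Int) (k : Int), Dom_next_min_k nums k → Spec_next_min_k nums k (next_min_k nums k)

-- ===== LEMMAS AND PROOFS =====

-- value of B at index i (the inner scan), as a total function of the index
def wval (nums : List Int) (k : Int) (i : Nat) : Int :=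
  match (PySem.List.pyRange (i : Int) (min ((i : Int) + k) (nums.length : Int)) 1).foldl
      (fun m j =>
        match m with
        | none => some (nums.getD j.toNat 0)
        | some v => if nums.getD j.toNat 0 < v then some (nums.getD j.toNat 0) else m) none with
  | some v => v
  | none => -1

-- j is inside the window that starts at lo
def InWin (n : Nat) (k : Int) (lo j : Nat) : Prop := lo ≤ j ∧ j < n ∧ (j : Int) < (lo : Int) + k

-- A's deque invariant after processing down to lo: all entries in the window, indices
-- decreasing / values increasing front-to-back, and every window element is dominated
def DeqInv (nums : List Int) (k : Int) (lo : Nat) (q : List Nat) : Prop :=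
  (∀ j ∈ q, InWin nums.length k lo j) ∧
  q.Pairwise (fun a b => b < a ∧ nums.getD a 0 < nums.getD b 0) ∧
  (∀ t, InWin nums.length k lo t → ∃ j ∈ q, j ≤ t ∧ nums.getD j 0 ≤ nums.getD t 0)

-- the answer list after A has processed indices lo..n-1
def ansSpec (nums : List Int) (k : Int) (lo : Nat) : List Int :=
  List.replicate lo (-1) ++ (List.range' lo (nums.length - lo)).map (wval nums k)

theorem popBackA_nil (nums : List Int) (x : Int) : popBackA nums x [] = [] := by
  rw [popBackA]

theorem popBackA_ne (nums : List Int) (x : Int) (q : List Nat) (hne : q ≠ []) :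
    popBackA nums x q =
      if x ≤ nums.getD (q.getLastD 0) 0 then popBackA nums x q.dropLast else q := by
  cases q with
  | nil => exact absurd rfl hne
  | cons a t => rw [popBackA]

theorem popBackA_concat_le (nums : List Int) (x : Int) (ys : List Nat) (b : Nat)
    (h : x ≤ nums.getD b 0) : popBackA nums x (ys ++ [b]) = popBackA nums x ys := by
  rw [popBackA_ne nums x _ (by simp), List.getLastD_concat, List.dropLast_concat, if_pos h]

theorem popBackA_concat_gt (nums : List Int) (x : Int) (ys : List Nat) (b : Nat)
    (h : ¬ x ≤ nums.getD b 0) : popBackA nums x (ys ++ [b]) = ys ++ [b] := by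
  rw [popBackA_ne nums x _ (by simp), List.getLastD_concat, if_neg h]

theorem popSplit (nums : List Int) (x : Int) (q : List Nat)
    (hp : q.Pairwise (fun a b => b < a ∧ nums.getD a 0 < nums.getD b 0)) :
    ∃ r, q = popBackA nums x q ++ r ∧ (∀ j ∈ r, x ≤ nums.getD j 0) ∧
      (∀ j ∈ popBackA nums x q, nums.getD j 0 < x) := by
  induction q using List.reverseRecOn with
  | nil => exact ⟨[], by simp [popBackA_nil]⟩
  | append_singleton ys b ih =>
    rcases List.pairwise_append.mp hp with ⟨hys, -, hrel⟩
    by_cases hb : x ≤ nums.getD b 0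
    · obtain ⟨r, hsplit, hr, hlt⟩ := ih hys
      refine ⟨r ++ [b], ?_, ?_, ?_⟩
      · rw [popBackA_concat_le nums x ys b hb, ← List.append_assoc, ← hsplit]
      · intro j hj
        rcases List.mem_append.mp hj with hj | hj
        · exact hr j hj
        · simp only [List.mem_singleton] at hj; subst hj; exact hb
      · rw [popBackA_concat_le nums x ys b hb]; exact hlt
    · refine ⟨[], by rw [popBackA_concat_gt nums x ys b hb, List.append_nil], by simp, ?_⟩
      rw [popBackA_concat_gt nums x ys b hb]
      intro j hj
      rcases List.mem_append.mp hj with hj | hj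
      · have := (hrel j hj b (List.mem_singleton.mpr rfl)).2
        omega
      · simp only [List.mem_singleton] at hj; subst hj; omega

theorem head_max (nums : List Int) (q : List Nat)
    (hp : q.Pairwise (fun a b => b < a ∧ nums.getD a 0 < nums.getD b 0))
    (j : Nat) (hj : j ∈ q) :
    j ≤ q.headD 0 ∧ nums.getD (q.headD 0) 0 ≤ nums.getD j 0 := by
  cases q with
  | nil => cases hj
  | cons h t =>
    rcases List.mem_cons.mp hj with rfl | hj
    · simp
    · have := (List.pairwise_cons.mp hp).1 j hj
      exact ⟨by simpa using le_of_lt this.1, by simpa using le_of_lt this.2⟩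

theorem wval_nonpos (nums : List Int) (k : Int) (lo : Nat) (hk : ¬ 0 < k) :
    wval nums k lo = -1 := by
  rw [wval, PySem.List.pyRange_one_eq_nil (le_trans (min_le_left _ _) (by omega))]
  rfl

theorem foldlMinSome (nums : List Int) :
    ∀ (js : List Int) (v : Int),
      js.foldl (fun m j =>
        match m with
        | none => some (nums.getD j.toNat 0)
        | some v => if nums.getD j.toNat 0 < v then some (nums.getD j.toNat 0) else m) (some v)
      = some ((js.map (fun j => nums.getD j.toNat 0)).foldl min v) := by
  intro js
  induction js with
  | nil => intro v; rfl
  | cons j t ih =>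
    intro v
    have hstep : (if nums.getD j.toNat 0 < v then some (nums.getD j.toNat 0) else some v)
        = some (min v (nums.getD j.toNat 0)) := by
      rw [min_def]; split_ifs <;> first | rfl | (exfalso; omega)
    simp only [List.foldl_cons, List.map_cons]
    rw [← ih (min v (nums.getD j.toNat 0)), ← hstep]

theorem wval_min (nums : List Int) (k : Int) (lo : Nat) (hk : 0 < k) (hlo : lo < nums.length) :
    ∃ t0, InWin nums.length k lo t0 ∧ wval nums k lo = nums.getD t0 0 ∧
      ∀ t, InWin nums.length k lo t → wval nums k lo ≤ nums.getD t 0 := by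
  have hlt : (lo : Int) < min ((lo : Int) + k) (nums.length : Int) :=
    lt_min (by omega) (by exact_mod_cast hlo)
  have hweq : wval nums k lo =
      ((PySem.List.pyRange ((lo : Int) + 1) (min ((lo : Int) + k) (nums.length : Int)) 1).map
        (fun j => nums.getD j.toNat 0)).foldl min (nums.getD lo 0) := by
    rw [wval, PySem.List.pyRange_one_cons hlt]
    simp only [List.foldl_cons, Int.toNat_natCast]
    rw [foldlMinSome]
  set gl := ((PySem.List.pyRange ((lo : Int) + 1) (min ((lo : Int) + k) (nums.length : Int)) 1).map
        (fun j => nums.getD j.toNat 0)) with hgl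
  have hmemwin : ∀ y ∈ gl, ∃ t, InWin nums.length k lo t ∧ nums.getD t 0 = y := by
    intro y hy
    obtain ⟨j, hj, rfl⟩ := List.mem_map.mp hy
    have hj' := PySem.List.mem_pyRange_one.mp hj
    rcases hj' with ⟨hj1, hj2⟩
    have hj2' := lt_min_iff.mp hj2
    refine ⟨j.toNat, ⟨by omega, by omega, by rw [Int.toNat_of_nonneg (by omega)]; omega⟩, rfl⟩
  have hlb : ∀ t, InWin nums.length k lo t →
      gl.foldl min (nums.getD lo 0) ≤ nums.getD t 0 := by
    intro t ht
    obtain ⟨h1, h2, h3⟩ := ht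
    rcases eq_or_lt_of_le h1 with rfl | hlt2
    · exact (PySem.List.foldl_min_le gl (nums.getD lo 0)).1
    · have hmem : nums.getD t 0 ∈ gl := by
        rw [hgl]
        refine List.mem_map.mpr ⟨(t : Int), PySem.List.mem_pyRange_one.mpr
          ⟨by omega, lt_min h3 (by exact_mod_cast h2)⟩, by rw [Int.toNat_natCast]⟩
      exact (PySem.List.foldl_min_le gl (nums.getD lo 0)).2 _ hmem
  rcases PySem.List.foldl_min_mem gl (nums.getD lo 0) with hm | hm
  · exact ⟨lo, ⟨le_rfl, hlo, by omega⟩, by rw [hweq, hm], fun t ht => by rw [hweq]; exact hlb t ht⟩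
  · obtain ⟨t0, ht0, ht0v⟩ := hmemwin _ hm
    exact ⟨t0, ht0, by rw [hweq, ← ht0v], fun t ht => by rw [hweq]; exact hlb t ht⟩

theorem deq_head_eq_wval (nums : List Int) (k : Int) (lo : Nat) (q : List Nat)
    (hk : 0 < k) (hlo : lo < nums.length) (hq : DeqInv nums k lo q) (hne : q ≠ []) :
    nums.getD (q.headD 0) 0 = wval nums k lo := by
  obtain ⟨hmem, hpair, hcomp⟩ := hq
  obtain ⟨t0, ht0, hwv, hlb⟩ := wval_min nums k lo hk hlo
  have hhead : q.headD 0 ∈ q := by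
    cases q with
    | nil => exact absurd rfl hne
    | cons h t => simp
  have h1 : wval nums k lo ≤ nums.getD (q.headD 0) 0 := hlb _ (hmem _ hhead)
  obtain ⟨j, hj, hjle, hjv⟩ := hcomp t0 ht0
  have h2 : nums.getD (q.headD 0) 0 ≤ wval nums k lo := by
    rw [hwv]
    exact le_trans (head_max nums q hpair j hj).2 hjv
  exact le_antisymm h2 h1

theorem stepPreserve (nums : List Int) (k : Int) (lo : Nat) (q : List Nat) (ans : List Int)
    (hlo : lo < nums.length) (hq : DeqInv nums k (lo + 1) q) :
    ∃ q', DeqInv nums k lo q' ∧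
      stepA nums k (ans, q) lo =
        ((if 0 < k then ans.set lo (wval nums k lo) else ans), q') := by
  obtain ⟨hmem, hpair, hcomp⟩ := hq
  obtain ⟨r, hsplit, hr, hq1lt⟩ := popSplit nums (nums.getD lo 0) q hpair
  set q1 := popBackA nums (nums.getD lo 0) q with hq1def
  have hq1sub : q1.Sublist q := by rw [hsplit]; exact List.sublist_append_left _ _
  have hq1pair := hpair.sublist hq1sub
  have hq1mem : ∀ j ∈ q1, lo + 1 ≤ j ∧ j < nums.length ∧ (j : Int) < (lo : Int) + 1 + k := by
    intro j hj
    have := hmem j (hq1sub.subset hj)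
    simp only [InWin] at this
    push_cast at this
    exact this
  by_cases hk : 0 < k
  · -- k > 0 : the window starting at lo is non-empty and ans[lo] is set
    have hq2pair : (q1 ++ [lo]).Pairwise
        (fun a b => b < a ∧ nums.getD a 0 < nums.getD b 0) := by
      refine List.pairwise_append.mpr ⟨hq1pair, List.pairwise_singleton _ _, ?_⟩
      intro a ha b hb
      simp only [List.mem_singleton] at hb
      subst hb
      exact ⟨by have := (hq1mem a ha).1; omega, hq1lt a ha⟩
    by_cases hc : ((q1 ++ [lo]).headD 0 : Int) + 1 - (lo : Int) > k
    · -- the front of the deque has fallen out of the window and is popped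
      cases hq1e : q1 with
      | nil =>
        rw [hq1e] at hc
        simp only [List.nil_append, List.headD_cons] at hc
        omega
      | cons a t1 =>
        have ha_mem : a ∈ q1 := by rw [hq1e]; exact List.mem_cons_self
        have haw := hq1mem a ha_mem
        have hceq : (a : Int) = (lo : Int) + k := by
          rw [hq1e] at hc
          simp only [List.cons_append, List.headD_cons] at hc
          omega
        have hq1pc := List.pairwise_cons.mp (hq1e ▸ hq1pair)
        have hInv' : DeqInv nums k lo (t1 ++ [lo]) := by
          refine ⟨?_, ?_, ?_⟩
          · intro j hj
            rcases List.mem_append.mp hj with hj | hj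
            · have hb := hq1mem j (by rw [hq1e]; exact List.mem_cons_of_mem _ hj)
              have hja := (hq1pc.1 j hj).1
              exact ⟨by omega, hb.2.1, by omega⟩
            · simp only [List.mem_singleton] at hj
              subst hj
              exact ⟨le_rfl, hlo, by omega⟩
          · have : ((a :: t1) ++ [lo]).Pairwise
                (fun a b => b < a ∧ nums.getD a 0 < nums.getD b 0) := hq1e ▸ hq2pair
            rw [List.cons_append] at this
            exact (List.pairwise_cons.mp this).2
          · intro t ht
            obtain ⟨ht1, ht2, ht3⟩ := ht
            rcases eq_or_lt_of_le ht1 with rfl | hlt2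
            · exact ⟨lo, List.mem_append.mpr (Or.inr (List.mem_singleton.mpr rfl)), le_rfl, le_rfl⟩
            · obtain ⟨j, hjq, hjle, hjv⟩ := hcomp t ⟨by omega, ht2, by push_cast; omega⟩
              rw [hsplit] at hjq
              rcases List.mem_append.mp hjq with hj1 | hjr
              · rw [hq1e] at hj1
                rcases List.mem_cons.mp hj1 with rfl | hj1
                · exfalso; omega
                · exact ⟨j, List.mem_append.mpr (Or.inl hj1), hjle, hjv⟩
              · exact ⟨lo, List.mem_append.mpr (Or.inr (List.mem_singleton.mpr rfl)),
                  by omega, le_trans (hr j hjr) hjv⟩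
        refine ⟨t1 ++ [lo], hInv', ?_⟩
        have hcond : 0 < ((a :: t1 ++ [lo]).length) ∧
            (((a :: t1 ++ [lo]).headD 0 : Int) + 1 - (lo : Int) > k) :=
          ⟨by simp, by simp; omega⟩
        simp only [stepA]
        rw [← hq1def, hq1e]
        rw [if_pos hcond]
        simp only [List.cons_append, List.tail_cons]
        rw [if_pos (show 0 < (t1 ++ [lo]).length by simp)]
        rw [deq_head_eq_wval nums k lo (t1 ++ [lo]) hk hlo hInv' (by simp), if_pos hk]
    · -- the whole deque is still inside the window
      have hInv' : DeqInv nums k lo (q1 ++ [lo]) := by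
        refine ⟨?_, hq2pair, ?_⟩
        · intro j hj
          rcases List.mem_append.mp hj with hj | hj
          · have hb := hq1mem j hj
            have hjh := (head_max nums (q1 ++ [lo]) hq2pair j
              (List.mem_append.mpr (Or.inl hj))).1
            exact ⟨by omega, hb.2.1, by omega⟩
          · simp only [List.mem_singleton] at hj
            subst hj
            exact ⟨le_rfl, hlo, by omega⟩
        · intro t ht
          obtain ⟨ht1, ht2, ht3⟩ := ht
          rcases eq_or_lt_of_le ht1 with rfl | hlt2
          · exact ⟨lo, List.mem_append.mpr (Or.inr (List.mem_singleton.mpr rfl)), le_rfl, le_rfl⟩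
          · obtain ⟨j, hjq, hjle, hjv⟩ := hcomp t ⟨by omega, ht2, by push_cast; omega⟩
            rw [hsplit] at hjq
            rcases List.mem_append.mp hjq with hj1 | hjr
            · exact ⟨j, List.mem_append.mpr (Or.inl hj1), hjle, hjv⟩
            · exact ⟨lo, List.mem_append.mpr (Or.inr (List.mem_singleton.mpr rfl)),
                by omega, le_trans (hr j hjr) hjv⟩
      refine ⟨q1 ++ [lo], hInv', ?_⟩
      have hcond : ¬ (0 < ((q1 ++ [lo]).length) ∧
          (((q1 ++ [lo]).headD 0 : Int) + 1 - (lo : Int) > k)) := fun h => hc h.2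
      simp only [stepA]
      rw [← hq1def]
      rw [if_neg hcond]
      rw [if_pos (show 0 < (q1 ++ [lo]).length by simp)]
      rw [deq_head_eq_wval nums k lo (q1 ++ [lo]) hk hlo hInv' (by simp), if_pos hk]
  · -- k ≤ 0 : the deque is empty before and after, ans is untouched
    have hqnil : q = [] := by
      cases hqe : q with
      | nil => rfl
      | cons a t =>
        exfalso
        have := hmem a (by rw [hqe]; exact List.mem_cons_self)
        simp only [InWin] at this
        push_cast at this
        omega
    subst hqnil
    refine ⟨[], ⟨by simp, by simp, ?_⟩, ?_⟩
    · intro t ht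
      obtain ⟨ht1, ht2, ht3⟩ := ht
      exfalso; omega
    · have hcond : 0 < (popBackA nums (nums.getD lo 0) [] ++ [lo]).length ∧
          (((popBackA nums (nums.getD lo 0) [] ++ [lo]).headD 0 : Int) + 1 - (lo : Int) > k) := by
        rw [popBackA_nil]
        exact ⟨by simp, by simp; omega⟩
      simp only [stepA]
      rw [if_pos hcond, popBackA_nil]
      simp only [List.nil_append, List.tail_cons, List.length_nil]
      rw [if_neg (by omega : ¬ (0:Nat) < 0), if_neg hk]

theorem set_mid (l1 l2 : List Int) (c v : Int) :
    (l1 ++ c :: l2).set l1.length v = l1 ++ v :: l2 := by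
  rw [List.set_append_right _ _ (le_refl _)]
  simp

theorem mainBaux (nums : List Int) (k : Int) :
    ∀ m, m ≤ nums.length →
      (List.range m).foldl (fun (ans : List Int) (i : Nat) =>
        let m := (PySem.List.pyRange (i : Int) (min ((i : Int) + k) (nums.length : Int)) 1).foldl
          (fun m j =>
            match m with
            | none => some (nums.getD j.toNat 0)
            | some v => if nums.getD j.toNat 0 < v then some (nums.getD j.toNat 0) else m) none
        match m with
        | some v => ans.set i v
        | none => ans) (List.replicate nums.length (-1)) =
      (List.range m).map (wval nums k) ++ List.replicate (nums.length - m) (-1) := by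
  intro m
  induction m with
  | zero => intro _; simp
  | succ m ih =>
    intro hm
    rw [List.range_succ, List.foldl_concat, List.map_append, ih (by omega)]
    have hrep : List.replicate (nums.length - m) (-1 : Int)
        = -1 :: List.replicate (nums.length - (m + 1)) (-1) := by
      have : nums.length - m = (nums.length - (m + 1)) + 1 := by omega
      rw [this, List.replicate_succ]
    simp only []
    rcases hfold : (PySem.List.pyRange (m : Int) (min ((m : Int) + k) (nums.length : Int)) 1).foldl
          (fun mm j =>
            match mm with
            | none => some (nums.getD j.toNat 0)
            | some v => if nums.getD j.toNat 0 < v then some (nums.getD j.toNat 0) else mm) none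
        with _ | v
    · have hw : wval nums k m = -1 := by rw [wval, hfold]
      rw [hfold, hrep]
      simp [hw]
    · have hw : wval nums k m = v := by rw [wval, hfold]
      rw [hfold, hrep]
      have hset := set_mid ((List.range m).map (wval nums k))
        (List.replicate (nums.length - (m + 1)) (-1)) (-1) v
      rw [show ((List.range m).map (wval nums k)).length = m by simp] at hset
      simp [hset, hw]

theorem mainB (nums : List Int) (k : Int) :
    next_min_k_alt nums k = (List.range nums.length).map (wval nums k) := by
  rw [next_min_k_alt, mainBaux nums k nums.length le_rfl]
  simp

theorem mainA (nums : List Int) (k : Int) :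
    ∀ m, m ≤ nums.length → ∃ q, DeqInv nums k (nums.length - m) q ∧
      (List.range' (nums.length - m) m).reverse.foldl (stepA nums k)
        (List.replicate nums.length (-1), []) = (ansSpec nums k (nums.length - m), q) := by
  intro m
  induction m with
  | zero =>
    intro _
    refine ⟨[], ⟨by simp, by simp, ?_⟩, ?_⟩
    · intro t ht
      obtain ⟨ht1, ht2, ht3⟩ := ht
      omega
    · simp [ansSpec]
  | succ m ih =>
    intro hm
    obtain ⟨q, hInv, hfold⟩ := ih (by omega)
    have hlo : nums.length - (m + 1) < nums.length := by omega
    have hn1 : nums.length - m = (nums.length - (m + 1)) + 1 := by omega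
    rw [hn1] at hInv hfold
    obtain ⟨q', hInv', hstep⟩ :=
      stepPreserve nums k (nums.length - (m + 1)) q
        (ansSpec nums k ((nums.length - (m + 1)) + 1)) hlo hInv
    refine ⟨q', hInv', ?_⟩
    rw [List.range'_succ, List.reverse_cons, List.foldl_concat, hfold, hstep]
    have hans : (if 0 < k then
        (ansSpec nums k ((nums.length - (m + 1)) + 1)).set (nums.length - (m + 1))
          (wval nums k (nums.length - (m + 1)))
        else ansSpec nums k ((nums.length - (m + 1)) + 1))
        = ansSpec nums k (nums.length - (m + 1)) := by
      have hcnt : nums.length - ((nums.length - (m + 1)) + 1) = m := by omega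
      have hcnt2 : nums.length - (nums.length - (m + 1)) = m + 1 := by omega
      have hspec1 : ansSpec nums k ((nums.length - (m + 1)) + 1)
          = List.replicate (nums.length - (m + 1)) (-1) ++
            ((-1 : Int) :: (List.range' ((nums.length - (m + 1)) + 1) m).map (wval nums k)) := by
        rw [ansSpec, hcnt, List.replicate_succ']
        simp
      have hspec0 : ansSpec nums k (nums.length - (m + 1))
          = List.replicate (nums.length - (m + 1)) (-1) ++
            (wval nums k (nums.length - (m + 1)) ::
              (List.range' ((nums.length - (m + 1)) + 1) m).map (wval nums k)) := by
        rw [ansSpec, hcnt2, List.range'_succ]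
        simp
      by_cases hk : 0 < k
      · rw [if_pos hk, hspec1, hspec0]
        have := set_mid (List.replicate (nums.length - (m + 1)) (-1 : Int))
          ((List.range' ((nums.length - (m + 1)) + 1) m).map (wval nums k)) (-1)
          (wval nums k (nums.length - (m + 1)))
        rw [List.length_replicate] at this
        exact this
      · rw [if_neg hk, hspec1, hspec0, wval_nonpos nums k _ hk]
    rw [hans]
-- ===== VERDICT (by name: the statement is the Claim_ definition above) =====
theorem next_min_k_spec : Claim_equal_next_min_k := by
  intro nums k _
  show next_min_k nums k = next_min_k_alt nums k
  obtain ⟨q, hInv, hfold⟩ := mainA nums k nums.length le_rfl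
  rw [next_min_k, mainB, List.range_eq_range']
  simp only [Nat.sub_self] at hfold
  rw [hfold]
  simp [ansSpec]
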